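-- pv_equiv track=rewrite | github.com/Uspectacle/Solver-Sudoku | sudoku.py | contient
-- ===== SOURCE A (Python) =====
-- import copy # On aura besoin de copy.deepcopy, pop et append
--
-- def retirer(L0,n):
--     L=copy.deepcopy(L0)
--     L2=[]
--     for k in range(len(L)):
--         if L[k]!=n:
--             L2.append(L[k])  # la nouvelle liste prend tout les elements de L0 qui ne sont pas n
--     return(L2)
--
-- def presence(L0,n):
--     L=copy.deepcopy(L0)
--     s=False
--     for k in range(len(L)):
--         if L[k]==n:
--             s=True
--     return(s)
--
-- def nombre(n):
--     return(presence([1,2,3,4,5,6,7,8,9],n))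
--
-- def contient(L0,N0):
--     L=copy.deepcopy(L0)
--     N=copy.deepcopy(N0)
--     S=[]
--     for k in range(len(L)):
--         if nombre(L[k])==False:
--             S.append(k)    # on suppose que L[k] contient N puis tente de le réfuter
--             for n in range(len(N)):
--                 if presence(L[k],N[n])==False:
--                     S=retirer(S,k) # refuté
--     return(S)
-- ===== SOURCE B (Python) =====
-- def contient(L0, N0):
--     # Value-major filtering: keep (index, cell) pairs and intersect down by
--     # each required value, instead of A's cell-major assume-then-refute loop.
--     S = list(enumerate(L0))
--     for v in N0:
--         S = [(k, cell) for (k, cell) in S if any(x == v for x in cell)]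
--     return [k for (k, _) in S]
-- ===== Notes on version B (the rewrite author's own statement) =====
-- stated objective: alternative
-- what changed: B transposes A's cell-major assume-append-then-refute loop (with quadratic list rebuilding via retirer) into a value-major shrinking filter over (index, cell) pairs, with no append/remove bookkeeping.
import Mathlib
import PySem

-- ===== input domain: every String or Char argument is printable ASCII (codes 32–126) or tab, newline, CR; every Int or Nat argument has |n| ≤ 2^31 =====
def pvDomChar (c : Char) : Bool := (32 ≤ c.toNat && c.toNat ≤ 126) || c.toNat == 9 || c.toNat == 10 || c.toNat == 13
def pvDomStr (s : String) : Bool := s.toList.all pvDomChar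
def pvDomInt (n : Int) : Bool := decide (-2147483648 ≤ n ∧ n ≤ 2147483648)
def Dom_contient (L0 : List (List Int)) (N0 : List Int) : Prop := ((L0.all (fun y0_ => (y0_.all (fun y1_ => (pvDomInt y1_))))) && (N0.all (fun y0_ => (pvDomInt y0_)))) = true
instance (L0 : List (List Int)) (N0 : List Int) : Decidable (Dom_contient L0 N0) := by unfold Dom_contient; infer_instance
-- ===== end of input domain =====

-- B replaces A's cell-major assume-then-refute scan by a value-major shrinking filter
-- over (index, cell) pairs (alternative decomposition; return value is identical).

-- ===== PORT A =====
-- deepcopy is the identity on immutable int data, so the L=deepcopy(L0) lines vanish.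
def retirer (L0 : List Int) (n : Int) : List Int :=
  (PySem.List.pyRange 0 L0.length 1).foldl
    (fun L2 k => if PySem.List.pyGetD L0 k 0 ≠ n then L2 ++ [PySem.List.pyGetD L0 k 0] else L2) []

def presence (L0 : List Int) (n : Int) : Bool :=
  (PySem.List.pyRange 0 L0.length 1).foldl
    (fun s k => if PySem.List.pyGetD L0 k 0 = n then true else s) false

-- Python's `cell == d` compares a list with an int, which is always False; exact on Dom.
def listEqInt (_cell : List Int) (_d : Int) : Bool := false

-- nombre(x) = presence([1,...,9], x); here x is a whole cell, so each comparison is list == int.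
def nombre (cell : List Int) : Bool :=
  ([1, 2, 3, 4, 5, 6, 7, 8, 9] : List Int).foldl
    (fun s d => if listEqInt cell d then true else s) false

def contient (L0 : List (List Int)) (N0 : List Int) : List Int :=
  (PySem.List.pyRange 0 L0.length 1).foldl
    (fun S k =>
      if nombre (PySem.List.pyGetD L0 k []) = false then
        (PySem.List.pyRange 0 N0.length 1).foldl
          (fun S' n =>
            if presence (PySem.List.pyGetD L0 k []) (PySem.List.pyGetD N0 n 0) = false then
              retirer S' k
            else S')
          (S ++ [k])
      else S)
    []

-- ===== PORT B =====
def contient_alt (L0 : List (List Int)) (N0 : List Int) : List Int :=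
  (N0.foldl (fun S v => S.filter (fun p => p.2.any (fun x => x == v)))
      (PySem.List.enumerate L0)).map (fun p => p.1)

-- ===== PRECONDITION & SPEC =====
def Spec_contient (L0 : List (List Int)) (N0 : List Int) (out : List Int) : Prop := out = contient_alt L0 N0
instance (L0 : List (List Int)) (N0 : List Int) (out : List Int) : Decidable (Spec_contient L0 N0 out) := by unfold Spec_contient; infer_instance

-- ===== CLAIM (what is proved, stated in full; the proofs are below) =====
def Claim_equal_contient : Prop := ∀ (L0 : List (List Int)) (N0 : List Int), Dom_contient L0 N0 → Spec_contient L0 N0 (contient L0 N0)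

-- ===== LEMMAS AND PROOFS =====

theorem nombre_eq_false (cell : List Int) : nombre cell = false := by
  simp [nombre, listEqInt]

theorem presence_eq (L : List Int) (n : Int) : presence L n = L.any (fun x => x == n) := by
  unfold presence
  rw [PySem.List.foldl_pyRange_zero_pyGetD' L 0 (fun s x => if x = n then true else s) false]
  suffices h : ∀ s : Bool, L.foldl (fun s x => if x = n then true else s) s = (s || L.any (fun x => x == n)) by
    simpa using h false
  induction L with
  | nil => intro s; simp
  | cons x L ih =>
    intro s
    rw [List.foldl_cons, List.any_cons]
    by_cases hx : x = n
    · rw [if_pos hx, ih true]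
      simp [hx]
    · rw [if_neg hx, ih s]
      have hb : (x == n) = false := by simpa using hx
      rw [hb, Bool.false_or]

theorem retirer_eq (L : List Int) (n : Int) :
    retirer L n = L.filter (fun x => decide (x ≠ n)) := by
  unfold retirer
  rw [PySem.List.foldl_pyRange_zero_pyGetD' L 0 (fun L2 x => if x ≠ n then L2 ++ [x] else L2) []]
  simpa using PySem.List.foldl_append_ite_eq_filter (p := fun x => x ≠ n) (l := L) (acc := [])

theorem retirer_of_not_mem (S : List Int) (k : Int) (h : k ∉ S) :
    retirer S k = S := by
  rw [retirer_eq, List.filter_eq_self]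
  intro x hx
  simp only [decide_eq_true_eq]
  exact fun hxk => h (hxk ▸ hx)

-- the inner loop of A on a state not containing k is the identity
theorem inner_no_k (cell : List Int) (k : Int) (N : List Int) :
    ∀ S : List Int, k ∉ S →
      N.foldl (fun S' v => if presence cell v = false then retirer S' k else S') S = S := by
  induction N with
  | nil => intro S _; rfl
  | cons v N ih =>
    intro S hS
    by_cases hv : presence cell v = false
    · rw [List.foldl_cons, if_pos hv, retirer_of_not_mem S k hS]; exact ih S hS
    · rw [List.foldl_cons, if_neg hv]; exact ih S hS

-- the inner loop of A starting from S ++ [k]: keep k iff every value is present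
theorem inner_char (cell : List Int) (k : Int) (N : List Int) (S : List Int) (hS : k ∉ S) :
    N.foldl (fun S' v => if presence cell v = false then retirer S' k else S') (S ++ [k])
      = S ++ (if N.all (fun v => presence cell v) then [k] else []) := by
  induction N with
  | nil => simp
  | cons v N ih =>
    by_cases hv : presence cell v = false
    · have hrem : retirer (S ++ [k]) k = S := by
        rw [retirer_eq, List.filter_append, List.filter_eq_self.mpr, List.filter_singleton]
        · simp
        · intro x hx; simp only [decide_eq_true_eq]; exact fun hxk => hS (hxk ▸ hx)
      rw [List.foldl_cons, if_pos hv, hrem, inner_no_k cell k N S hS]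
      simp [hv]
    · have hv' : presence cell v = true := by
        cases h : presence cell v with
        | false => exact absurd h hv
        | true => rfl
      rw [List.foldl_cons, if_neg hv, ih]
      simp [hv']

-- A's outer loop, over any pair list whose indices dominate the accumulator
theorem outer_char (N0 : List Int) :
    ∀ (E : List (Int × List Int)) (S : List Int),
      (∀ x ∈ S, ∀ p ∈ E, x < p.1) → E.Pairwise (fun p q => p.1 < q.1) →
      E.foldl (fun S p =>
          N0.foldl (fun S' v => if presence p.2 v = false then retirer S' p.1 else S') (S ++ [p.1])) S
        = S ++ (E.filter (fun p => N0.all (fun v => presence p.2 v))).map (fun p => p.1) := by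
  intro E
  induction E with
  | nil => intro S _ _; simp
  | cons p E ih =>
    intro S hlt hpw
    have hk : p.1 ∉ S := fun h => lt_irrefl p.1 (hlt p.1 h p List.mem_cons_self)
    rw [List.foldl_cons, inner_char p.2 p.1 N0 S hk]
    rw [List.pairwise_cons] at hpw
    rcases Bool.eq_false_or_eq_true (N0.all (fun v => presence p.2 v)) with hp | hp
    case inr =>
      rw [if_neg (by simp [hp]), List.append_nil,
        ih S (fun x hx q hq => hlt x hx q (List.mem_cons_of_mem _ hq)) hpw.2]
      simp [hp]
    case inl =>
      have h' : ∀ x ∈ S ++ [p.1], ∀ q ∈ E, x < q.1 := by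
        intro x hx q hq
        rcases List.mem_append.mp hx with h | h
        · exact hlt x h q (List.mem_cons_of_mem _ hq)
        · simp at h; exact h ▸ hpw.1 q hq
      rw [if_pos (by simp [hp]), ih (S ++ [p.1]) h' hpw.2]
      simp [hp]

-- B's value-major loop is one filter by the conjunction of all values
theorem valuefold_char (N : List Int) :
    ∀ E : List (Int × List Int),
      N.foldl (fun S v => S.filter (fun p => p.2.any (fun x => x == v))) E
        = E.filter (fun p => N.all (fun v => p.2.any (fun x => x == v))) := by
  induction N with
  | nil => intro E; simp
  | cons v N ih =>
    intro E
    rw [List.foldl_cons, ih, List.filter_filter]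
    apply List.filter_congr
    intro p _
    simp [Bool.and_comm]

-- ===== VERDICT (by name: the statement is the Claim_ definition above) =====
theorem contient_spec : Claim_equal_contient := by
  intro L0 N0 _
  unfold Spec_contient contient contient_alt
  have hpw : ((PySem.List.pyRange 0 (L0.length : Int) 1).map
      (fun j => (j, PySem.List.pyGetD L0 j []))).Pairwise (fun p q : Int × List Int => p.1 < q.1) := by
    rw [List.pairwise_map]
    simpa using PySem.List.pairwise_lt_pyRange_one (a := 0) (b := (L0.length : Int))
  have hmain := outer_char N0 ((PySem.List.pyRange 0 (L0.length : Int) 1).map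
      (fun j => (j, PySem.List.pyGetD L0 j []))) [] (by simp) hpw
  rw [List.foldl_map] at hmain
  simp only [List.nil_append] at hmain
  rw [valuefold_char, PySem.List.enumerate_eq_map_pyRange (xs := L0) (d := [])]
  have hinner : ∀ (k : Int) (cell : List Int) (S : List Int),
      (PySem.List.pyRange 0 (N0.length : Int) 1).foldl
        (fun S' n => if presence cell (PySem.List.pyGetD N0 n 0) = false then retirer S' k else S') S
      = N0.foldl (fun S' v => if presence cell v = false then retirer S' k else S') S :=
    fun k cell S => PySem.List.foldl_pyRange_zero_pyGetD' N0 0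
      (fun S' v => if presence cell v = false then retirer S' k else S') S
  simp only [nombre_eq_false, if_true, hinner]
  rw [hmain]
  simp [presence_eq]
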